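-- pv_equiv track=rewrite | github.com/kingnaja79-lab/child-support-calculator | child_support_2021.py | income_bracket_index
-- ===== SOURCE A (Python) =====
-- from typing import List, Optional, Dict, Any, Tuple
--
-- INCOME_BRACKETS_MW: List[Tuple[int, Optional[int]]] = [
--     (0, 199),
--     (200, 299),
--     (300, 399),
--     (400, 499),
--     (500, 599),
--     (600, 699),
--     (700, 799),
--     (800, 899),
--     (900, 999),
--     (1000, 1199),
--     (1200, None),
-- ]
--
-- def income_bracket_index(combined_income_krw: int) -> int:
--     mw = combined_income_krw // 10_000
--     for idx, (lo, hi) in enumerate(INCOME_BRACKETS_MW):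
--         if hi is None:
--             if mw >= lo:
--                 return idx
--         else:
--             if lo <= mw <= hi:
--                 return idx
--     # Should be unreachable
--     raise ValueError(f"Combined income not in any bracket: {combined_income_krw} KRW")
-- ===== SOURCE B (Python) =====
-- def income_bracket_index(combined_income_krw: int) -> int:
--     mw = combined_income_krw // 10_000
--     if mw >= 1200:
--         return 10
--     if mw >= 1000:
--         return 9
--     if mw >= 200:
--         return mw // 100 - 1
--     return 0
-- ===== Notes on version B (the rewrite author's own statement) =====
-- stated objective: simpler
-- what changed: Replaces the linear scan over the bracket table with a closed-form threshold/arithmetic classification (mw//100 - 1 for the uniform 200-999 range, constants for the edges).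
import Mathlib
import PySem

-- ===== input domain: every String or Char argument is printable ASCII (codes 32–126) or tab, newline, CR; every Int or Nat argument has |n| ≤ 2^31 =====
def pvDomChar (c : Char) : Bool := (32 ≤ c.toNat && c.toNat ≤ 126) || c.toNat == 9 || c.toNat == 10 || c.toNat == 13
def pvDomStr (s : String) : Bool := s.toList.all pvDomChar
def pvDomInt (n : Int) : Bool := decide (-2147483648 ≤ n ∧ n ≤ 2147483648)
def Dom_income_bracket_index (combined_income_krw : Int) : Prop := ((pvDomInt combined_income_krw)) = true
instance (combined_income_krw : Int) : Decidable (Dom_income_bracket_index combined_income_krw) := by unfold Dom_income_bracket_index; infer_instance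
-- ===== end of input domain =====

-- B replaces A's linear scan of the bracket table with a closed-form threshold classification (objective: simpler).


-- ===== PORT A =====
def INCOME_BRACKETS_MW : List (Int × Option Int) :=
  [(0, some 199), (200, some 299), (300, some 399), (400, some 499), (500, some 599),
   (600, some 699), (700, some 799), (800, some 899), (900, some 999),
   (1000, some 1199), (1200, none)]

-- the 'for idx, (lo, hi) in enumerate(...)' loop with early return; none = the final 'raise ValueError'
def pvScanA (mw : Int) : List (Int × Option Int) → Int → Option Int
  | [], _ => none
  | (lo, hi) :: rest, idx =>
    match hi with
    | none => if mw ≥ lo then some idx else pvScanA mw rest (idx + 1)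
    | some h => if lo ≤ mw ∧ mw ≤ h then some idx else pvScanA mw rest (idx + 1)

def income_bracket_index (combined_income_krw : Int) : Int :=
  let mw := PySem.Int.floordiv combined_income_krw 10000
  (pvScanA mw INCOME_BRACKETS_MW 0).getD 0   -- none (ValueError) is excluded by Pre_

-- ===== PORT B =====
def income_bracket_index_alt (combined_income_krw : Int) : Int :=
  let mw := PySem.Int.floordiv combined_income_krw 10000
  if mw ≥ 1200 then 10
  else if mw ≥ 1000 then 9
  else if mw ≥ 200 then PySem.Int.floordiv mw 100 - 1
  else 0

-- ===== PRECONDITION & SPEC =====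
-- Pre_ excludes exactly the inputs on which A raises ValueError (negative income → mw < 0, no bracket).
def Pre_income_bracket_index (combined_income_krw : Int) : Prop := 0 ≤ combined_income_krw
instance (combined_income_krw : Int) : Decidable (Pre_income_bracket_index combined_income_krw) := by unfold Pre_income_bracket_index; infer_instance
def pvWitness_income_bracket_index : Int := 2500000

def Spec_income_bracket_index (combined_income_krw : Int) (out : Int) : Prop := out = income_bracket_index_alt combined_income_krw
instance (combined_income_krw : Int) (out : Int) : Decidable (Spec_income_bracket_index combined_income_krw out) := by unfold Spec_income_bracket_index; infer_instance

-- ===== CLAIM (what is proved, stated in full; the proofs are below) =====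
def Claim_equal_income_bracket_index : Prop := ∀ (combined_income_krw : Int), Dom_income_bracket_index combined_income_krw → Pre_income_bracket_index combined_income_krw → Spec_income_bracket_index combined_income_krw (income_bracket_index combined_income_krw)

-- ===== LEMMAS AND PROOFS =====
set_option maxHeartbeats 2000000 in
theorem pv_main (mw : Int) (h : 0 ≤ mw) :
    (pvScanA mw INCOME_BRACKETS_MW 0).getD 0 =
      (if mw ≥ 1200 then (10:Int) else if mw ≥ 1000 then 9 else if mw ≥ 200 then PySem.Int.floordiv mw 100 - 1 else 0) := by
  rw [show PySem.Int.floordiv mw 100 = mw / 100 from PySem.Int.floordiv_eq_ediv_of_pos (by omega)]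
  simp only [INCOME_BRACKETS_MW, pvScanA]
  split_ifs <;> simp only [Option.getD_some, Option.getD_none] <;> omega

-- ===== VERDICT (by name: the statement is the Claim_ definition above) =====
theorem income_bracket_index_spec : Claim_equal_income_bracket_index := by
  intro c _ hpre
  unfold Spec_income_bracket_index income_bracket_index income_bracket_index_alt
  have hmw : 0 ≤ PySem.Int.floordiv c 10000 := by
    rw [PySem.Int.floordiv_eq_ediv_of_pos (by omega)]
    exact Int.ediv_nonneg hpre (by omega)
  exact pv_main _ hmw
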